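-- pv_equiv track=rewrite | github.com/zhiayang/sap | tools/sort_includes.py | sort_includes
-- ===== SOURCE A (Python) =====
-- import collections
--
-- def folder(line):
--     components = line.split('"')
--     if len(components) < 3:
--         return ""
--     else:
--         folder = components[1].split('/')
--         return '/'.join(folder[:-1])
--
-- def sort_includes(source):
--     out=''
--     includes=[]
--     for line in source.split('\n'):
--         if line.startswith('#include'):
--             includes.append(line)
--         else:
--             includes_by_dir = collections.defaultdict(list)
--             for i in includes:
--                 includes_by_dir[folder(i)].append(i)
--             for includes_in_dir in includes_by_dir.values():
--                 includes_in_dir.sort(key=lambda line: (len(line[:line.find('//')].rstrip()), line))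
--             includes2 = list(includes_by_dir.items())
--             includes2.sort(key=lambda pair: (len(pair[0]), pair[0]))
--
--             for num, includes_in_dir in enumerate(includes2):
--                 for i in includes_in_dir[1]:
--                     out += i
--                     out += '\n'
--                 if num != len(includes2) - 1:
--                     out += '\n'
--             includes.clear()
--             out += line
--             out += '\n'
--     return out[:-1]
-- ===== SOURCE B (Python) =====
-- def folder(line):
--     components = line.split('"')
--     if len(components) < 3:
--         return ""
--     else:
--         folder = components[1].split('/')
--         return '/'.join(folder[:-1])
--
-- def sort_includes(source):
--     out = ''
--     includes = []
--     for line in source.split('\n'):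
--         if line.startswith('#include'):
--             includes.append(line)
--         else:
--             ordered = sorted(includes, key=lambda i: ((len(folder(i)), folder(i)),
--                                                       (len(i[:i.find('//')].rstrip()), i)))
--             prev = None
--             for i in ordered:
--                 f = folder(i)
--                 if prev is not None and f != prev:
--                     out += '\n'
--                 out += i
--                 out += '\n'
--                 prev = f
--             includes = []
--             out += line
--             out += '\n'
--     return out[:-1]
-- ===== Notes on version B (the rewrite author's own statement) =====
-- stated objective: simpler
-- what changed: Replaces the per-flush defaultdict grouping plus per-group sorts plus a sort of the groups with a single sort of the flat include list under the composite key ((len(folder),folder),(len(prefix),line)), then one linear pass that inserts the blank separator whenever the folder changes.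
import Mathlib
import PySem

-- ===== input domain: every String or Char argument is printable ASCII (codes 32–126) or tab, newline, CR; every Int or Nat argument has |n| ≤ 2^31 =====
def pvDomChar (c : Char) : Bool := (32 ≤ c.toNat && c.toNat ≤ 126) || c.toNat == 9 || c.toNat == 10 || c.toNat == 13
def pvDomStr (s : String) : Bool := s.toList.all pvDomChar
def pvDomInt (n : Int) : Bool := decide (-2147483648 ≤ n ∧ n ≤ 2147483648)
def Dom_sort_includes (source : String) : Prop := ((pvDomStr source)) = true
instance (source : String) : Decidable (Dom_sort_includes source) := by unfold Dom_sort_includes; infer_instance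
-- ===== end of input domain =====

-- B replaces A's per-flush dict grouping + per-group sorts + sort of the groups by ONE sort of the
-- flat include list under a composite lexicographic key and a single linear emission pass.

-- ===== PORT A =====
-- helper 'folder' of Source A (shared by Source B, which defines it identically)
def folder (line : String) : String :=
  let components := (PySem.Str.split? line "\"").getD []   -- sep "\"" ≠ "" so split? is always some
  if components.length < 3 then ""
  else
    let f := (PySem.Str.split? (PySem.List.pyGetD components 1 "") "/").getD []
    PySem.Str.join "/" (PySem.List.slice f none (some (-1)))

-- len(line[:line.find('//')].rstrip()) — the first component of the within-directory sort key
-- (identical lambda text in Source A and Source B)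
def lineKeyLen (i : String) : Int :=
  PySem.Str.len (PySem.Str.rstrip (PySem.Str.slice i none (some (PySem.Str.find i "//"))))

def sort_includes (source : String) : String :=
  let lines := (PySem.Str.split? source "\n").getD []      -- sep "\n" ≠ "" so split? is always some
  let st := lines.foldl (fun (st : String × List String) line =>
    if PySem.Str.startswith line "#include" then (st.1, st.2 ++ [line])
    else
      let d := st.2.foldl (fun d i =>
        PySem.Dict.modify d (folder i) [] (fun l => l ++ [i])) (PySem.Dict.mk [])
      let d2 := d.items.map (fun p => (p.1, PySem.List.sorted p.2 (fun l => toLex (lineKeyLen l, l))))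
      let includes2 := PySem.List.sorted d2 (fun pr => toLex (PySem.Str.len pr.1, pr.1))
      let out := (PySem.List.enumerate includes2).foldl (fun out p =>
          let out := p.2.2.foldl (fun o i => o ++ i ++ "\n") out
          if p.1 ≠ PySem.List.len includes2 - 1 then out ++ "\n" else out) st.1
      (out ++ line ++ "\n", ([] : List String))) (("", []) : String × List String)
  PySem.Str.slice st.1 none (some (-1))

-- ===== PORT B =====
def sort_includes_alt (source : String) : String :=
  let lines := (PySem.Str.split? source "\n").getD []      -- sep "\n" ≠ "" so split? is always some
  let st := lines.foldl (fun (st : String × List String) line =>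
    if PySem.Str.startswith line "#include" then (st.1, st.2 ++ [line])
    else
      let ordered := PySem.List.sorted st.2
        (fun i => toLex (toLex (PySem.Str.len (folder i), folder i), toLex (lineKeyLen i, i)))
      let r := ordered.foldl (fun (p : String × Option String) i =>
          let f := folder i
          let out := match p.2 with
            | none => p.1
            | some q => if f ≠ q then p.1 ++ "\n" else p.1
          (out ++ i ++ "\n", some f)) (st.1, (none : Option String))
      (r.1 ++ line ++ "\n", ([] : List String))) (("", []) : String × List String)
  PySem.Str.slice st.1 none (some (-1))

-- ===== PRECONDITION & SPEC =====
def Spec_sort_includes (source : String) (out : String) : Prop := out = sort_includes_alt source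
instance (source : String) (out : String) : Decidable (Spec_sort_includes source out) := by unfold Spec_sort_includes; infer_instance

-- ===== CLAIM (what is proved, stated in full; the proofs are below) =====
def Claim_equal_sort_includes : Prop := ∀ (source : String), Dom_sort_includes source → Spec_sort_includes source (sort_includes source)

-- ===== LEMMAS AND PROOFS =====

-- the three keys
def gkey (f : String) : Lex (Int × String) := toLex (PySem.Str.len f, f)
def ikey (i : String) : Lex (Int × String) := toLex (lineKeyLen i, i)
def bkey (i : String) : Lex (Lex (Int × String) × Lex (Int × String)) := toLex (gkey (folder i), ikey i)

-- group of an include directory, in input order / sorted; first-occurrence key list / sorted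
def grp (inc : List String) (f : String) : List String := inc.filter (fun i => folder i == f)
def keysOf (inc : List String) : List String := PySem.List.dedup (inc.map folder)
def sgrp (inc : List String) (f : String) : List String := PySem.List.sorted (grp inc f) ikey
def skeys (inc : List String) : List String := PySem.List.sorted (keysOf inc) gkey

-- emission pieces
def cat (out : String) (G : List String) : String := G.foldl (fun o i => o ++ i ++ "\n") out
def emitR (out : String) : List (String × List String) → String
  | [] => out
  | [(_, G)] => cat out G
  | (_, G) :: p :: rest => emitR (cat out G ++ "\n") (p :: rest)
def emitRB (out : String) (L : List (String × List String)) : String :=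
  L.foldl (fun o p => cat (o ++ "\n") p.2) out

def wstep (p : String × Option String) (i : String) : String × Option String :=
  let f := folder i
  let out := match p.2 with
    | none => p.1
    | some q => if f ≠ q then p.1 ++ "\n" else p.1
  (out ++ i ++ "\n", some f)

-- ---- key facts ----
theorem gkey_inj : Function.Injective gkey := by
  intro a b h
  exact (by simpa [gkey, Prod.ext_iff] using congrArg ofLex h : a.length = b.length ∧ a = b).2

theorem gkey_lt_of_le_of_ne {a b : String} (h : gkey a ≤ gkey b) (hne : a ≠ b) : gkey a < gkey b :=
  lt_of_le_of_ne h (fun e => hne (gkey_inj e))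

theorem bkey_inj : Function.Injective bkey := by
  intro a b h
  have h2 := congrArg ofLex h
  simp only [bkey, Prod.ext_iff, ofLex_toLex] at h2
  have h3 := congrArg ofLex h2.2
  exact (by simpa [ikey, Prod.ext_iff] using h3 : lineKeyLen a = lineKeyLen b ∧ a = b).2

theorem bkey_le_of_same {a b : String} (h : folder a = folder b) (hi : ikey a ≤ ikey b) :
    bkey a ≤ bkey b := by
  simp only [bkey, Prod.Lex.toLex_le_toLex]
  exact Or.inr ⟨by rw [h], hi⟩

theorem bkey_lt_of_glt {a b : String} (h : gkey (folder a) < gkey (folder b)) :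
    bkey a < bkey b := by
  simp only [bkey, Prod.Lex.toLex_lt_toLex]
  exact Or.inl h

-- ---- group structure facts ----
theorem mem_grp {inc : List String} {f i : String} (h : i ∈ grp inc f) : folder i = f := by
  simp only [grp, List.mem_filter, beq_iff_eq] at h
  exact h.2

theorem mem_sgrp {inc : List String} {f i : String} (h : i ∈ sgrp inc f) : folder i = f :=
  mem_grp ((PySem.List.mem_sorted _ _ _ _).1 h)

theorem sgrp_ne_nil {inc : List String} {f : String} (h : f ∈ keysOf inc) : sgrp inc f ≠ [] := by
  rw [keysOf, PySem.List.mem_dedup, List.mem_map] at h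
  obtain ⟨i, hi, rfl⟩ := h
  rw [Ne, sgrp, PySem.List.sorted_eq_nil_iff]
  intro hg
  have : i ∈ grp inc (folder i) := by simp [grp, List.mem_filter, hi]
  rw [hg] at this; exact (List.not_mem_nil).elim this

theorem skeys_nodup (inc : List String) : (skeys inc).Nodup :=
  ((PySem.List.sorted_perm _ _ _).nodup_iff).2 (by simpa [keysOf] using PySem.List.nodup_dedup (inc.map folder))

theorem mem_skeys {inc : List String} {f : String} : f ∈ skeys inc ↔ f ∈ keysOf inc := by
  simp [skeys, PySem.List.mem_sorted]

-- skeys is strictly increasing under gkey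
theorem skeys_pairwise_lt (inc : List String) :
    (skeys inc).Pairwise (fun a b => gkey a < gkey b) := by
  have h1 := PySem.List.sorted_pairwise (keysOf inc) gkey
  have h2 := (skeys_nodup inc)
  exact ((h1.and h2).imp (fun h => gkey_lt_of_le_of_ne h.1 h.2))

-- ---- L1: the dict built by A's grouping loop ----
theorem grp_append_self (pre : List String) (i : String) :
    grp (pre ++ [i]) (folder i) = grp pre (folder i) ++ [i] := by
  simp [grp, List.filter_append]

theorem grp_append_other {pre : List String} {i f : String} (h : f ≠ folder i) :
    grp (pre ++ [i]) f = grp pre f := by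
  simp [grp, List.filter_append, beq_eq_false_iff_ne.2 (Ne.symm h)]

theorem keysOf_append_mem {pre : List String} {i : String} (h : folder i ∈ pre.map folder) :
    keysOf (pre ++ [i]) = keysOf pre := by
  simp only [keysOf, List.map_append, List.map_cons, List.map_nil,
    PySem.List.dedup_eq_ofList, PySem.Set.ofList_append_singleton]
  exact PySem.Set.add_of_mem (by rw [← PySem.List.dedup_eq_ofList, PySem.List.mem_dedup]; exact h)

theorem keysOf_append_not_mem {pre : List String} {i : String} (h : folder i ∉ pre.map folder) :
    keysOf (pre ++ [i]) = keysOf pre ++ [folder i] := by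
  simp only [keysOf, List.map_append, List.map_cons, List.map_nil,
    PySem.List.dedup_eq_ofList, PySem.Set.ofList_append_singleton]
  exact PySem.Set.add_of_not_mem (by rw [← PySem.List.dedup_eq_ofList, PySem.List.mem_dedup]; exact h)

theorem find?_beq_self {l : List String} {k : String} (h : k ∈ l) :
    l.find? (fun x => x == k) = some k := by
  induction l with
  | nil => cases h
  | cons a t ih =>
    by_cases ha : a = k
    · subst ha; simp
    · rw [List.find?_cons_of_neg (by simpa using ha)]
      rcases List.mem_cons.1 h with e | hm
      · exact absurd e.symm ha
      · exact ih hm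

theorem any_map_keys (pre : List String) (l : List String) (k : String) :
    (l.map (fun f => (f, grp pre f))).any (fun p => p.1 == k) = decide (k ∈ l) := by
  induction l with
  | nil => rfl
  | cons a t ih =>
    by_cases ha : a = k
    · subst ha; simp
    · simp only [List.map_cons, List.any_cons, ih, beq_eq_false_iff_ne.2 ha,
        Bool.false_or, List.mem_cons]
      simp [show ¬ k = a from fun e => ha e.symm]

theorem dict_step (pre : List String) (i : String) :
    PySem.Dict.modify (PySem.Dict.mk ((keysOf pre).map (fun f => (f, grp pre f)))) (folder i) []
      (fun l => l ++ [i])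
    = PySem.Dict.mk ((keysOf (pre ++ [i])).map (fun f => (f, grp (pre ++ [i]) f))) := by
  have hco : (PySem.Dict.mk ((keysOf pre).map (fun f => (f, grp pre f)))).contains (folder i)
      = decide (folder i ∈ keysOf pre) := by
    simp only [PySem.Dict.contains]
    exact any_map_keys pre (keysOf pre) (folder i)
  by_cases hk : folder i ∈ pre.map folder
  · have hmem : folder i ∈ keysOf pre := by rw [keysOf, PySem.List.mem_dedup]; exact hk
    have hget : (PySem.Dict.mk ((keysOf pre).map (fun f => (f, grp pre f)))).getD (folder i) []
        = grp pre (folder i) := by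
      rw [PySem.Dict.getD, PySem.Dict.get?]
      show (Option.map _ (List.find? _ ((keysOf pre).map (fun f => (f, grp pre f))))).getD _ = _
      rw [List.find?_map]
      rw [show ((fun (p : String × List String) => p.1 == folder i) ∘ fun f => (f, grp pre f))
            = fun f => f == folder i from rfl]
      rw [find?_beq_self hmem]
      rfl
    rw [PySem.Dict.modify, hget, PySem.Dict.insert, hco]
    simp only [hmem, decide_true, if_true]
    rw [keysOf_append_mem hk]
    congr 1
    rw [List.map_map]
    apply List.map_congr_left
    intro f hf
    by_cases he : f = folder i
    · subst he
      simp [Function.comp, grp_append_self]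
    · simp [Function.comp, beq_eq_false_iff_ne.2 he, grp_append_other he]
  · have hmem : folder i ∉ keysOf pre := by rw [keysOf, PySem.List.mem_dedup]; exact hk
    have hget : (PySem.Dict.mk ((keysOf pre).map (fun f => (f, grp pre f)))).getD (folder i) []
        = [] := by
      apply PySem.Dict.getD_of_not_contains
      rw [hco]; simpa using hmem
    rw [PySem.Dict.modify, hget, PySem.Dict.insert, hco]
    simp only [hmem, decide_false, Bool.false_eq_true, if_false]
    rw [keysOf_append_not_mem hk]
    congr 1
    rw [List.map_append]
    congr 1
    · apply List.map_congr_left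
      intro f hf
      have he : f ≠ folder i := fun e => hmem (e ▸ hf)
      rw [grp_append_other he]
    · have hg0 : grp pre (folder i) = [] := by
        rw [grp, List.filter_eq_nil_iff]
        intro x hx
        simp only [beq_iff_eq]
        exact fun e => hk (e ▸ List.mem_map_of_mem hx)
      simp [grp_append_self, hg0]

theorem dict_fold (rest : List String) : ∀ pre : List String,
    (rest.foldl (fun d i => PySem.Dict.modify d (folder i) [] (fun l => l ++ [i]))
        (PySem.Dict.mk ((keysOf pre).map (fun f => (f, grp pre f)))))
      = PySem.Dict.mk ((keysOf (pre ++ rest)).map (fun f => (f, grp (pre ++ rest) f))) := by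
  induction rest with
  | nil => intro pre; simp
  | cons i rest ih =>
    intro pre
    rw [List.foldl_cons, dict_step, ih (pre ++ [i])]
    simp

theorem dict_items (inc : List String) :
    (inc.foldl (fun d i => PySem.Dict.modify d (folder i) [] (fun l => l ++ [i]))
        (PySem.Dict.mk [])).items
      = (keysOf inc).map (fun f => (f, grp inc f)) := by
  have h0 : (PySem.Dict.mk ([] : List (String × List String)))
      = PySem.Dict.mk ((keysOf ([] : List String)).map (fun f => (f, grp [] f))) := rfl
  rw [h0, dict_fold inc [], List.nil_append]

-- ---- L2: A's sorted items list ----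
theorem sorted_items (inc : List String) :
    PySem.List.sorted ((keysOf inc).map (fun f => (f, sgrp inc f)))
        (fun pr => toLex (PySem.Str.len pr.1, pr.1))
      = (skeys inc).map (fun f => (f, sgrp inc f)) := by
  apply PySem.List.sorted_eq_of_perm_of_pairwise_lt
  · exact (PySem.List.sorted_perm (keysOf inc) gkey false).map _
  · refine List.pairwise_map.2 ((skeys_pairwise_lt inc).imp ?_)
    intro a b h; exact h

-- ---- L3: B's flat sort is the concatenation of the sorted groups ----
theorem sum_map_ite_single {c : Nat} : ∀ (ks : List String) (f0 : String),
    ks.Nodup → f0 ∈ ks → (ks.map (fun f => if f0 = f then c else 0)).sum = c := by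
  intro ks f0 hnd hmem
  induction ks with
  | nil => cases hmem
  | cons k rest ih =>
    rcases List.mem_cons.1 hmem with rfl | hm
    · have hz : ∀ x ∈ rest.map (fun f => if f0 = f then c else 0), x = 0 := by
        intro x hx
        obtain ⟨f, hf, rfl⟩ := List.mem_map.1 hx
        have : f0 ≠ f := fun e => (List.nodup_cons.1 hnd).1 (e ▸ hf)
        simp [this]
      simp [List.sum_eq_zero hz]
    · have : f0 ≠ k := fun e => (List.nodup_cons.1 hnd).1 (e ▸ hm)
      simp only [List.map_cons, List.sum_cons, if_neg (by exact this)]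
      rw [ih (List.nodup_cons.1 hnd).2 hm]
      omega

theorem partition_perm (inc : List String) :
    ((keysOf inc).flatMap (fun f => grp inc f)).Perm inc := by
  rw [List.perm_iff_count]
  intro a
  rw [List.count_flatMap]
  by_cases ha : a ∈ inc
  · have h1 : (keysOf inc).map (List.count a ∘ fun f => grp inc f)
        = (keysOf inc).map (fun f => if folder a = f then List.count a inc else 0) := by
      apply List.map_congr_left
      intro f _
      by_cases he : folder a = f
      · simp only [Function.comp, grp, he, if_pos rfl]
        exact List.count_filter (by simp [he])
      · simp only [Function.comp, grp, if_neg he]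
        apply List.count_eq_zero.2
        intro hmem
        exact he (by simpa [grp, List.mem_filter] using (List.mem_filter.1 hmem).2)
    rw [h1, sum_map_ite_single _ _ (by simpa [keysOf] using PySem.List.nodup_dedup (inc.map folder))
        (by rw [keysOf, PySem.List.mem_dedup]; exact List.mem_map_of_mem ha)]
  · have hz : ∀ x ∈ (keysOf inc).map (List.count a ∘ fun f => grp inc f), x = 0 := by
      intro x hx
      obtain ⟨f, _, rfl⟩ := List.mem_map.1 hx
      exact List.count_eq_zero.2 (fun hm => ha (List.mem_of_mem_filter hm))
    rw [List.sum_eq_zero hz, List.count_eq_zero.2 ha]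

theorem flat_sort (inc : List String) :
    PySem.List.sorted inc bkey = (skeys inc).flatMap (fun f => sgrp inc f) := by
  apply PySem.List.eq_of_perm_of_pairwise_le_of_injective bkey bkey_inj
  · refine (PySem.List.sorted_perm inc bkey false).trans ?_
    have h1 : ((skeys inc).flatMap (fun f => sgrp inc f)).Perm
        ((keysOf inc).flatMap (fun f => grp inc f)) := by
      exact List.Perm.flatMap (PySem.List.sorted_perm (keysOf inc) gkey false)
        (fun f _ => PySem.List.sorted_perm (grp inc f) ikey false)
    exact (h1.trans (partition_perm inc)).symm
  · exact PySem.List.sorted_pairwise inc bkey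
  · rw [List.pairwise_flatMap]
    constructor
    · intro f _
      refine (PySem.List.sorted_pairwise (grp inc f) ikey).imp_of_mem ?_
      intro a b hma hmb hab
      exact bkey_le_of_same (by rw [mem_sgrp hma, mem_sgrp hmb]) hab
    · refine (skeys_pairwise_lt inc).imp_of_mem ?_
      intro f1 f2 _ _ h x hx y hy
      have := bkey_lt_of_glt (a := x) (b := y) (by rw [mem_sgrp hx, mem_sgrp hy]; exact h)
      exact le_of_lt this

-- ---- L4a: A's enumerate emission loop is emitR ----
theorem enum_emit_aux (N : Int) (L : List (String × List String)) :
    ∀ (n : Int) (out : String), n + L.length = N →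
    (PySem.List.enumerate L n).foldl (fun out p =>
        let out := p.2.2.foldl (fun o i => o ++ i ++ "\n") out
        if p.1 ≠ N - 1 then out ++ "\n" else out) out
      = emitR out L := by
  induction L with
  | nil => intro n out _; rfl
  | cons p rest ih =>
    intro n out hn
    obtain ⟨f, G⟩ := p
    show List.foldl _ _ ((n, (f, G)) :: PySem.List.enumerate rest (n+1)) = _
    rw [List.foldl_cons]
    cases rest with
    | nil =>
      have : ¬ (n ≠ N - 1) := by simp at hn ⊢; omega
      simp only [this, if_neg, if_false]
      rfl
    | cons q rest2 =>
      have : n ≠ N - 1 := by simp at hn; omega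
      simp only [this, if_true, ite_true, ne_eq, not_false_eq_true]
      rw [ih (n+1) _ (by simp at hn ⊢; omega)]
      rfl

theorem enum_emit (L : List (String × List String)) (out : String) :
    (PySem.List.enumerate L).foldl (fun out p =>
        let out := p.2.2.foldl (fun o i => o ++ i ++ "\n") out
        if p.1 ≠ PySem.List.len L - 1 then out ++ "\n" else out) out
      = emitR out L := by
  have := enum_emit_aux (PySem.List.len L) L 0 out (by simp [PySem.List.len_eq])
  simpa using this

-- ---- L4b: B's walk is emitR ----
theorem emitR_eq_emitRB (rest : List (String × List String)) (f : String) (G : List String)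
    (out : String) : emitR out ((f, G) :: rest) = emitRB (cat out G) rest := by
  induction rest generalizing f G out with
  | nil => rfl
  | cons p rest ih =>
    obtain ⟨f2, G2⟩ := p
    rw [emitR, ih]
    rfl

theorem walk_same (G : List String) (f : String) (hf : ∀ i ∈ G, folder i = f) :
    ∀ out, G.foldl wstep (out, some f) = (cat out G, some f) := by
  induction G with
  | nil => intro out; rfl
  | cons i G ih =>
    intro out
    have hfi : folder i = f := hf i (List.mem_cons_self)
    have h1 : wstep (out, some f) i = (out ++ i ++ "\n", some f) := by
      simp [wstep, hfi]
    rw [List.foldl_cons, h1, ih (fun j hj => hf j (List.mem_cons_of_mem _ hj))]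
    rfl

theorem walk_block (G : List String) (f : String) (hG : G ≠ [])
    (hf : ∀ i ∈ G, folder i = f) (out : String) (q? : Option String)
    (hq : ∀ q, q? = some q → q ≠ f) :
    G.foldl wstep (out, q?) =
      (cat (match q? with | none => out | some _ => out ++ "\n") G, some f) := by
  cases G with
  | nil => exact absurd rfl hG
  | cons i G =>
    have hfi : folder i = f := hf i (List.mem_cons_self)
    cases q? with
    | none =>
      have h1 : wstep (out, none) i = (out ++ i ++ "\n", some f) := by simp [wstep, hfi]
      rw [List.foldl_cons, h1, walk_same G f (fun j hj => hf j (List.mem_cons_of_mem _ hj))]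
      rfl
    | some q =>
      have hfq : ¬ (f = q) := fun e => hq q rfl e.symm
      have h1 : wstep (out, some q) i = ((out ++ "\n") ++ i ++ "\n", some f) := by
        simp [wstep, hfi, hfq]
      rw [List.foldl_cons, h1, walk_same G f (fun j hj => hf j (List.mem_cons_of_mem _ hj))]
      rfl

theorem walk_after (L : List (String × List String)) :
    ∀ (out : String) (q : String),
    (∀ p ∈ L, p.2 ≠ []) → (∀ p ∈ L, ∀ i ∈ p.2, folder i = p.1) →
    ((L.map Prod.fst).Nodup) → (∀ p ∈ L, p.1 ≠ q) →
    (L.flatMap (fun p => p.2)).foldl wstep (out, some q) =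
      (emitRB out L, some ((L.map Prod.fst).getLastD q)) := by
  induction L with
  | nil => intro out q _ _ _ _; rfl
  | cons p L ih =>
    intro out q hne hfold hnd hq
    obtain ⟨f, G⟩ := p
    rw [List.flatMap_cons, List.foldl_append]
    rw [walk_block G f (hne (f, G) (List.mem_cons_self)) (hfold (f, G) (List.mem_cons_self))
        out (some q) (fun q' hq' e => by
          cases hq'
          exact hq (f, G) List.mem_cons_self e.symm)]
    have hnd2 : (f :: L.map Prod.fst).Nodup := by simpa using hnd
    have hnd' := List.nodup_cons.1 hnd2
    rw [ih (cat (out ++ "\n") G) f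
        (fun p hp => hne p (List.mem_cons_of_mem _ hp))
        (fun p hp => hfold p (List.mem_cons_of_mem _ hp))
        hnd'.2
        (fun p hp e => hnd'.1 (e ▸ List.mem_map_of_mem hp))]
    simp only [List.map_cons, List.getLastD_cons]
    rfl

theorem walk_emit (L : List (String × List String))
    (hne : ∀ p ∈ L, p.2 ≠ [])
    (hfold : ∀ p ∈ L, ∀ i ∈ p.2, folder i = p.1)
    (hnd : (L.map Prod.fst).Nodup) (out : String) :
    ((L.flatMap (fun p => p.2)).foldl wstep (out, none)).1 = emitR out L := by
  cases L with
  | nil => rfl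
  | cons p L =>
    obtain ⟨f, G⟩ := p
    have hnd2 : (f :: L.map Prod.fst).Nodup := by simpa using hnd
    have hnd' := List.nodup_cons.1 hnd2
    rw [List.flatMap_cons, List.foldl_append]
    rw [walk_block G f (hne (f, G) (List.mem_cons_self)) (hfold (f, G) (List.mem_cons_self))
        out none (fun q hq => by cases hq)]
    rw [walk_after L (cat out G) f
        (fun p hp => hne p (List.mem_cons_of_mem _ hp))
        (fun p hp => hfold p (List.mem_cons_of_mem _ hp))
        hnd'.2
        (fun p hp e => hnd'.1 (e ▸ List.mem_map_of_mem hp))]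
    rw [emitR_eq_emitRB]

-- ---- flush equality ----
theorem flush_eq (out : String) (inc : List String) :
    ((PySem.List.enumerate (PySem.List.sorted
        ((inc.foldl (fun d i => PySem.Dict.modify d (folder i) [] (fun l => l ++ [i]))
            (PySem.Dict.mk [])).items.map
          (fun p => (p.1, PySem.List.sorted p.2 (fun l => toLex (lineKeyLen l, l)))))
        (fun pr => toLex (PySem.Str.len pr.1, pr.1)))).foldl (fun out p =>
          let out := p.2.2.foldl (fun o i => o ++ i ++ "\n") out
          if p.1 ≠ PySem.List.len (PySem.List.sorted
            ((inc.foldl (fun d i => PySem.Dict.modify d (folder i) [] (fun l => l ++ [i]))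
                (PySem.Dict.mk [])).items.map
              (fun p => (p.1, PySem.List.sorted p.2 (fun l => toLex (lineKeyLen l, l)))))
            (fun pr => toLex (PySem.Str.len pr.1, pr.1))) - 1
          then out ++ "\n" else out) out)
      = ((PySem.List.sorted inc
          (fun i => toLex (toLex (PySem.Str.len (folder i), folder i), toLex (lineKeyLen i, i)))).foldl
          wstep (out, (none : Option String))).1 := by
  rw [dict_items]
  rw [show ((keysOf inc).map (fun f => (f, grp inc f))).map
        (fun p => (p.1, PySem.List.sorted p.2 (fun l => toLex (lineKeyLen l, l))))
      = (keysOf inc).map (fun f => (f, sgrp inc f)) from by rw [List.map_map]; rfl]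
  rw [sorted_items]
  rw [enum_emit]
  rw [show (fun i => toLex (toLex (PySem.Str.len (folder i), folder i), toLex (lineKeyLen i, i)))
      = bkey from rfl]
  rw [flat_sort]
  rw [show (skeys inc).flatMap (fun f => sgrp inc f)
      = ((skeys inc).map (fun f => (f, sgrp inc f))).flatMap (fun p => p.2) from by
        rw [List.flatMap_map]]
  rw [walk_emit]
  · intro p hp
    obtain ⟨f, hf, rfl⟩ := List.mem_map.1 hp
    exact sgrp_ne_nil (mem_skeys.1 hf)
  · intro p hp i hi
    obtain ⟨f, hf, rfl⟩ := List.mem_map.1 hp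
    exact mem_sgrp hi
  · rw [List.map_map]
    rw [show (Prod.fst ∘ fun f => (f, sgrp inc f)) = id from rfl, List.map_id]
    exact skeys_nodup inc

theorem step_eq :
    (fun (st : String × List String) line =>
      if PySem.Str.startswith line "#include" then (st.1, st.2 ++ [line])
      else
        let d := st.2.foldl (fun d i =>
          PySem.Dict.modify d (folder i) [] (fun l => l ++ [i])) (PySem.Dict.mk [])
        let d2 := d.items.map (fun p => (p.1, PySem.List.sorted p.2 (fun l => toLex (lineKeyLen l, l))))
        let includes2 := PySem.List.sorted d2 (fun pr => toLex (PySem.Str.len pr.1, pr.1))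
        let out := (PySem.List.enumerate includes2).foldl (fun out p =>
            let out := p.2.2.foldl (fun o i => o ++ i ++ "\n") out
            if p.1 ≠ PySem.List.len includes2 - 1 then out ++ "\n" else out) st.1
        (out ++ line ++ "\n", ([] : List String)))
    = (fun (st : String × List String) line =>
      if PySem.Str.startswith line "#include" then (st.1, st.2 ++ [line])
      else
        let ordered := PySem.List.sorted st.2
          (fun i => toLex (toLex (PySem.Str.len (folder i), folder i), toLex (lineKeyLen i, i)))
        let r := ordered.foldl (fun (p : String × Option String) i =>
            let f := folder i
            let out := match p.2 with
              | none => p.1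
              | some q => if f ≠ q then p.1 ++ "\n" else p.1
            (out ++ i ++ "\n", some f)) (st.1, (none : Option String))
        (r.1 ++ line ++ "\n", ([] : List String))) := by
  funext st line
  by_cases h : PySem.Str.startswith line "#include" = true
  · simp only [h, if_true]
  · simp only [h, if_false]
    refine congrArg (fun o => (o ++ line ++ "\n", ([] : List String))) ?_
    exact flush_eq st.1 st.2

-- ===== VERDICT (by name: the statement is the Claim_ definition above) =====
theorem sort_includes_spec : Claim_equal_sort_includes := by
  intro source _
  show sort_includes source = sort_includes_alt source
  unfold sort_includes sort_includes_alt
  rw [step_eq]
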